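-- pv_equiv track=rewrite | github.com/psiudo/Algorithm | 백준/Silver/1436. 영화감독 숌/영화감독 숌.py | where666
-- ===== SOURCE A (Python) =====
-- def where666(exp, k):
--     if k % 10 == 6:
--         return where666(exp + 1, k // 10)
--     else:
--         if '666' in str(k) :
--             return exp, True
--         else:
--             return exp, False
-- ===== SOURCE B (Python) =====
-- def where666(exp, k):
--     while k % 10 == 6:
--         exp += 1
--         k //= 10
--     return exp, '666' in str(k)
-- ===== Notes on version B (the rewrite author's own statement) =====
-- stated objective: simpler
-- what changed: Replaces A's tail recursion with an explicit while loop that strips trailing 6-digits in place, then a single return with the membership test.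
import Mathlib
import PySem

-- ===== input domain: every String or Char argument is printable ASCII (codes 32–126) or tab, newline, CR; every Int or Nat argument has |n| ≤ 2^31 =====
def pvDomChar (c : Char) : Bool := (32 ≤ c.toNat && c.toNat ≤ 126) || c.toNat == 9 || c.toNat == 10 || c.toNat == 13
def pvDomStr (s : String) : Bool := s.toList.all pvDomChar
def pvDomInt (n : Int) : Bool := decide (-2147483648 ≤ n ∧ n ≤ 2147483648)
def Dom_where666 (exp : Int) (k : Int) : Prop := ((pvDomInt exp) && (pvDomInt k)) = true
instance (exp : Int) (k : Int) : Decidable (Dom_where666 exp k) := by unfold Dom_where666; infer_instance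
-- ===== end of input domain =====

-- B rewrites A's tail recursion as an explicit while loop that strips trailing 6-digits, then one return; objective: simpler.

-- termination fact for the trailing-6 stripping (cited by both ports' decreasing_by)
theorem pvStrip_lt (k : Int) (h : PySem.Int.mod k 10 = 6) :
    (PySem.Int.floordiv k 10).natAbs < k.natAbs := by
  rw [PySem.Int.floordiv_eq_ediv_of_pos (by norm_num)]
  rw [PySem.Int.mod_eq_emod_of_pos (by norm_num)] at h
  omega

-- ===== PORT A =====
def where666 (exp : Int) (k : Int) : Int × Bool :=
  if h : PySem.Int.mod k 10 = 6 then
    where666 (exp + 1) (PySem.Int.floordiv k 10)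
  else
    if PySem.Str.isIn "666" (PySem.Int.toStr k) then (exp, true) else (exp, false)
termination_by k.natAbs
decreasing_by exact pvStrip_lt k h

-- ===== PORT B =====
-- the while loop: while k % 10 == 6: exp += 1; k //= 10
def pvStripLoop (exp : Int) (k : Int) : Int × Int :=
  if h : PySem.Int.mod k 10 = 6 then
    pvStripLoop (exp + 1) (PySem.Int.floordiv k 10)
  else (exp, k)
termination_by k.natAbs
decreasing_by exact pvStrip_lt k h

def where666_alt (exp : Int) (k : Int) : Int × Bool :=
  let p := pvStripLoop exp k
  (p.1, PySem.Str.isIn "666" (PySem.Int.toStr p.2))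

-- ===== PRECONDITION & SPEC =====
def Spec_where666 (exp : Int) (k : Int) (out : Int × Bool) : Prop := out = where666_alt exp k
instance (exp : Int) (k : Int) (out : Int × Bool) : Decidable (Spec_where666 exp k out) := by unfold Spec_where666; infer_instance

-- ===== CLAIM (what is proved, stated in full; the proofs are below) =====
def Claim_equal_where666 : Prop := ∀ (exp : Int) (k : Int), Dom_where666 exp k → Spec_where666 exp k (where666 exp k)

-- ===== LEMMAS AND PROOFS =====
theorem where666_eq_alt (exp k : Int) : where666 exp k = where666_alt exp k := by
  generalize hk : k.natAbs = n
  induction n using Nat.strong_induction_on generalizing exp k with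
  | _ n ih =>
    subst hk
    rw [where666, where666_alt, pvStripLoop]
    by_cases h : PySem.Int.mod k 10 = 6
    · simp only [h, dif_pos]
      rw [ih _ (pvStrip_lt k h) (exp + 1) _ rfl, where666_alt]
    · simp only [h, dif_neg, not_false_iff]
      cases hc : PySem.Str.isIn "666" (PySem.Int.toStr k) <;> simp [hc]

-- ===== VERDICT (by name: the statement is the Claim_ definition above) =====
theorem where666_spec : Claim_equal_where666 := by
  intro exp k _
  unfold Spec_where666
  exact where666_eq_alt exp k
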